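-- pv_equiv track=rewrite | github.com/Fanelemenzi/Carfinity | notifications/management/commands/monitor_dashboard_health.py | calculate_overall_health_status
-- ===== SOURCE A (Python) =====
-- def calculate_overall_health_status(health_indicators):
--     """
--     Calculate overall system health status
--     """
--     statuses = []
--     for indicator, data in health_indicators.items():
--         if isinstance(data, dict) and 'status' in data:
--             statuses.append(data['status'])
--
--     if 'error' in statuses:
--         return 'critical'
--     elif 'warning' in statuses or 'degraded' in statuses:
--         return 'warning'
--     elif all(status == 'healthy' for status in statuses):
--         return 'healthy'
--     else:
--         return 'unknown'
-- ===== SOURCE B (Python) =====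
-- def calculate_overall_health_status(health_indicators):
--     """
--     Calculate overall system health status (priority-reduction form):
--     map each status to a severity rank, take the maximum, translate back.
--     """
--     SEV = {'error': 4, 'warning': 3, 'degraded': 3, 'healthy': 1}
--     LABEL = {4: 'critical', 3: 'warning', 2: 'unknown', 1: 'healthy'}
--     rank = 1
--     for data in health_indicators.values():
--         if isinstance(data, dict) and 'status' in data:
--             rank = max(rank, SEV.get(data['status'], 2))
--     return LABEL[rank]
-- ===== Notes on version B (the rewrite author's own statement) =====
-- stated objective: idiomatic
-- what changed: Replaces A's status-list collection plus ordered membership-test ladder by a single-pass maximum-severity reduction (error=4, warning/degraded=3, unrecognized=2, healthy=1, empty default 1) translated back to a label.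
import Mathlib
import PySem

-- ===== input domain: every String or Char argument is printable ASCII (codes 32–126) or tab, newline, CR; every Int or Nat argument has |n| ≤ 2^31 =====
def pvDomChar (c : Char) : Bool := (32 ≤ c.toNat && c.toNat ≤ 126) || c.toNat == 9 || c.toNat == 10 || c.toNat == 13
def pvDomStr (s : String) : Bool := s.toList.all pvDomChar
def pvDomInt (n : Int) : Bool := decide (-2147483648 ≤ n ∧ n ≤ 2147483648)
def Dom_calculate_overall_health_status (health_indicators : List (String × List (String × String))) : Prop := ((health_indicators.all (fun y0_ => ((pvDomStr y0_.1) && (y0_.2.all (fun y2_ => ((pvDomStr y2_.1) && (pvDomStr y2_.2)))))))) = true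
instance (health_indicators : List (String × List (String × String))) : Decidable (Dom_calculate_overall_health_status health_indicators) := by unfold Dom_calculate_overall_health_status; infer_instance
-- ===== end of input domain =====

-- B replaces A's membership-test ladder over a collected status list by a one-pass
-- maximum-severity reduction translated back to a label (idiomatic priority fold).


-- ===== PORT A =====
-- A: collect data['status'] for every indicator whose dict has the key, then the
-- membership-test ladder.  ('status' in data / data['status'] = first matching key.)
def calculate_overall_health_status (health_indicators : List (String × List (String × String))) : String :=
  let statuses := health_indicators.foldl
    (fun acc p =>
      match p.2.find? (fun q => q.1 == "status") with
      | some q => acc ++ [q.2]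
      | none   => acc) []
  if statuses.contains "error" then "critical"
  else if statuses.contains "warning" || statuses.contains "degraded" then "warning"
  else if statuses.all (fun s => s == "healthy") then "healthy"
  else "unknown"

-- ===== PORT B =====
-- SEV.get(s, 2)
def pvSev (s : String) : Nat :=
  if s = "error" then 4
  else if s = "warning" then 3
  else if s = "degraded" then 3
  else if s = "healthy" then 1
  else 2

-- LABEL[rank]
def pvLabel (r : Nat) : String :=
  if r = 4 then "critical" else if r = 3 then "warning" else if r = 2 then "unknown" else "healthy"

def calculate_overall_health_status_alt (health_indicators : List (String × List (String × String))) : String :=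
  pvLabel (health_indicators.foldl
    (fun r p =>
      match p.2.find? (fun q => q.1 == "status") with
      | some q => max r (pvSev q.2)
      | none   => r) 1)

-- ===== PRECONDITION & SPEC =====
def Spec_calculate_overall_health_status (health_indicators : List (String × List (String × String))) (out : String) : Prop := out = calculate_overall_health_status_alt health_indicators
instance (health_indicators : List (String × List (String × String))) (out : String) : Decidable (Spec_calculate_overall_health_status health_indicators out) := by unfold Spec_calculate_overall_health_status; infer_instance

-- ===== CLAIM (what is proved, stated in full; the proofs are below) =====
def Claim_equal_calculate_overall_health_status : Prop := ∀ (health_indicators : List (String × List (String × String))), Dom_calculate_overall_health_status health_indicators → Spec_calculate_overall_health_status health_indicators (calculate_overall_health_status health_indicators)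

-- ===== LEMMAS AND PROOFS =====

-- the extracted status list (proof-only helper)
def pvStatuses (hi : List (String × List (String × String))) : List String :=
  hi.filterMap (fun p => (p.2.find? (fun q => q.1 == "status")).map (·.2))

-- maximum severity of a status list (0 for empty)
def pvSevMax (ss : List String) : Nat :=
  ss.foldr (fun s m => max (pvSev s) m) 0

lemma pvA_fold (hi : List (String × List (String × String))) (acc : List String) :
    hi.foldl (fun acc p =>
      match p.2.find? (fun q => q.1 == "status") with
      | some q => acc ++ [q.2]
      | none   => acc) acc = acc ++ pvStatuses hi := by
  induction hi generalizing acc with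
  | nil => simp [pvStatuses]
  | cons h t ih =>
    simp only [List.foldl_cons, pvStatuses, List.filterMap_cons]
    cases hf : h.2.find? (fun q => q.1 == "status") with
    | none => simpa [pvStatuses] using ih acc
    | some q => simp [ih, pvStatuses]

lemma pvB_fold (hi : List (String × List (String × String))) (r : Nat) :
    hi.foldl (fun r p =>
      match p.2.find? (fun q => q.1 == "status") with
      | some q => max r (pvSev q.2)
      | none   => r) r = max r (pvSevMax (pvStatuses hi)) := by
  induction hi generalizing r with
  | nil => simp [pvStatuses, pvSevMax]
  | cons h t ih =>
    simp only [List.foldl_cons, pvStatuses, List.filterMap_cons]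
    cases hf : h.2.find? (fun q => q.1 == "status") with
    | none => simpa [pvStatuses] using ih r
    | some q =>
      simp only [Option.map_some, pvSevMax, List.foldr_cons]
      rw [ih]
      simp [pvStatuses, pvSevMax, Nat.max_assoc]

lemma pvSev_le (s : String) : pvSev s ≤ 4 := by
  unfold pvSev; split_ifs <;> omega

lemma pvSev_le3 (s : String) (h : s ≠ "error") : pvSev s ≤ 3 := by
  unfold pvSev; rw [if_neg h]; split_ifs <;> omega

lemma pvSev_le2 (s : String) (h1 : s ≠ "error") (h2 : s ≠ "warning") (h3 : s ≠ "degraded") :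
    pvSev s ≤ 2 := by
  unfold pvSev; rw [if_neg h1, if_neg h2, if_neg h3]; split_ifs <;> omega

lemma pvSev_ge2 (s : String) (h : s ≠ "healthy") : 2 ≤ pvSev s := by
  unfold pvSev; split_ifs with a b c <;> omega

lemma pvSevMax_le (ss : List String) : pvSevMax ss ≤ 4 := by
  induction ss with
  | nil => simp [pvSevMax]
  | cons s t ih => simp only [pvSevMax, List.foldr_cons] at *; exact Nat.max_le.mpr ⟨pvSev_le s, ih⟩

lemma pvSevMax_error (ss : List String) (h : ss.contains "error" = true) : pvSevMax ss = 4 := by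
  induction ss with
  | nil => simp at h
  | cons s t ih =>
    simp only [List.contains_cons, Bool.or_eq_true, beq_iff_eq] at h
    simp only [pvSevMax, List.foldr_cons]
    rcases h with h | h
    · have ht := pvSevMax_le t
      subst h
      rw [show pvSev "error" = 4 from rfl]
      simp only [pvSevMax] at ht; omega
    · have := ih h
      have := pvSev_le s
      simp only [pvSevMax] at *; omega

lemma pvSevMax_no_error (ss : List String) (h : ss.contains "error" = false) : pvSevMax ss ≤ 3 := by
  induction ss with
  | nil => simp [pvSevMax]
  | cons s t ih =>
    simp only [List.contains_cons, Bool.or_eq_false_iff, beq_eq_false_iff_ne, ne_eq] at h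
    have h1 : pvSev s ≤ 3 := pvSev_le3 s (fun hs => h.1 hs.symm)
    have h2 := ih h.2
    simp only [pvSevMax, List.foldr_cons] at *; omega

lemma pvSevMax_wd (ss : List String) (h : ss.contains "warning" = true ∨ ss.contains "degraded" = true) :
    3 ≤ pvSevMax ss := by
  induction ss with
  | nil => simp at h
  | cons s t ih =>
    simp only [List.contains_cons, Bool.or_eq_true, beq_iff_eq] at h
    simp only [pvSevMax, List.foldr_cons]
    rcases h with (h | h) | (h | h)
    · subst h; simp [pvSev]
    · have := ih (Or.inl h); simp only [pvSevMax] at this; omega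
    · subst h; simp [pvSev]
    · have := ih (Or.inr h); simp only [pvSevMax] at this; omega

lemma pvSevMax_plain (ss : List String)
    (he : ss.contains "error" = false) (hw : ss.contains "warning" = false)
    (hd : ss.contains "degraded" = false) : pvSevMax ss ≤ 2 := by
  induction ss with
  | nil => simp [pvSevMax]
  | cons s t ih =>
    simp only [List.contains_cons, Bool.or_eq_false_iff, beq_eq_false_iff_ne, ne_eq] at he hw hd
    have h1 : pvSev s ≤ 2 :=
      pvSev_le2 s (fun hs => he.1 hs.symm) (fun hs => hw.1 hs.symm) (fun hs => hd.1 hs.symm)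
    have h2 := ih he.2 hw.2 hd.2
    simp only [pvSevMax, List.foldr_cons] at *; omega

lemma pvSevMax_healthy (ss : List String) (h : ss.all (fun s => s == "healthy") = true) :
    pvSevMax ss ≤ 1 := by
  induction ss with
  | nil => simp [pvSevMax]
  | cons s t ih =>
    simp only [List.all_cons, Bool.and_eq_true, beq_iff_eq] at h
    have h2 := ih h.2
    simp only [pvSevMax, List.foldr_cons] at *
    have : pvSev s = 1 := by rw [h.1]; simp [pvSev]
    omega

lemma pvSevMax_not_healthy (ss : List String) (h : ss.all (fun s => s == "healthy") = false) :
    2 ≤ pvSevMax ss := by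
  induction ss with
  | nil => simp at h
  | cons s t ih =>
    simp only [List.all_cons, Bool.and_eq_false_iff, beq_eq_false_iff_ne, ne_eq] at h
    simp only [pvSevMax, List.foldr_cons]
    rcases h with h | h
    · have : 2 ≤ pvSev s := pvSev_ge2 s h
      omega
    · have := ih h; simp only [pvSevMax] at this; omega

-- ===== VERDICT (by name: the statement is the Claim_ definition above) =====
theorem calculate_overall_health_status_spec : Claim_equal_calculate_overall_health_status := by
  intro hi _
  show calculate_overall_health_status hi = calculate_overall_health_status_alt hi
  unfold calculate_overall_health_status calculate_overall_health_status_alt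
  rw [pvA_fold, pvB_fold, List.nil_append]
  set ss := pvStatuses hi with hss
  by_cases he : ss.contains "error" = true
  · rw [if_pos he, pvSevMax_error ss he]; rfl
  · rw [Bool.not_eq_true] at he
    rw [if_neg (by simpa using he)]
    by_cases hwd : (ss.contains "warning" || ss.contains "degraded") = true
    · rw [if_pos hwd]
      have h3 : 3 ≤ pvSevMax ss := pvSevMax_wd ss (by simpa using hwd)
      have h3' : pvSevMax ss ≤ 3 := pvSevMax_no_error ss he
      have : pvSevMax ss = 3 := le_antisymm h3' h3
      rw [this]; rfl
    · rw [Bool.not_eq_true, Bool.or_eq_false_iff] at hwd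
      rw [if_neg (fun hc => by
        rw [Bool.or_eq_true] at hc
        rcases hc with hc | hc
        · rw [hwd.1] at hc; exact Bool.false_ne_true hc
        · rw [hwd.2] at hc; exact Bool.false_ne_true hc)]
      by_cases hh : ss.all (fun s => s == "healthy") = true
      · rw [if_pos hh]
        have := pvSevMax_healthy ss hh
        interval_cases h : pvSevMax ss <;> rfl
      · rw [Bool.not_eq_true] at hh
        rw [if_neg (by simpa using hh)]
        have h2 := pvSevMax_not_healthy ss hh
        have h2' := pvSevMax_plain ss he hwd.1 hwd.2
        have : pvSevMax ss = 2 := le_antisymm h2' h2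
        rw [this]; rfl
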